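-- pv_equiv track=rewrite | github.com/jikime/starnion-stock | backend/app/infrastructure/master/scorers.py | _get_options_expiry
-- ===== SOURCE A (Python) =====
-- def _get_options_expiry(year: int, month: int) -> int:
--     """해당 월의 옵션 만기일(둘째 주 목요일) 반환."""
--
--     import calendar
--
--     cal = calendar.Calendar(firstweekday=0)  # 월=0
--     thursdays = [
--         d
--         for d in cal.itermonthdays2(year, month)
--         if d[0] != 0 and d[1] == 3  # 목요일 = 3
--     ]
--     return thursdays[1][0]  # 둘째 주 목요일
-- ===== SOURCE B (Python) =====
-- def _weekday(year: int, month: int) -> int: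
--     """Sakamoto's congruence: weekday of the 1st of the month, Monday=0."""
--     t = [0, 3, 2, 5, 0, 3, 5, 1, 4, 6, 2, 4]
--     y = year - 1 if month < 3 else year
--     return (y + y // 4 - y // 100 + y // 400 + t[month - 1]) % 7
--
--
-- def _get_options_expiry(year: int, month: int) -> int:
--     """해당 월의 옵션 만기일(둘째 주 목요일) 반환."""
--     return 8 + (3 - _weekday(year, month)) % 7  # second Thursday is day 8..14
-- ===== Notes on version B (the rewrite author's own statement) =====
-- stated objective: simpler
-- what changed: Replaces building the month's (day, weekday) list and filtering Thursdays by pure arithmetic: Sakamoto's congruence gives the weekday of the 1st, then 8 + (3 - wd) % 7 is the second Thursday; no calendar module and no per-day loop.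
import Mathlib
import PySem

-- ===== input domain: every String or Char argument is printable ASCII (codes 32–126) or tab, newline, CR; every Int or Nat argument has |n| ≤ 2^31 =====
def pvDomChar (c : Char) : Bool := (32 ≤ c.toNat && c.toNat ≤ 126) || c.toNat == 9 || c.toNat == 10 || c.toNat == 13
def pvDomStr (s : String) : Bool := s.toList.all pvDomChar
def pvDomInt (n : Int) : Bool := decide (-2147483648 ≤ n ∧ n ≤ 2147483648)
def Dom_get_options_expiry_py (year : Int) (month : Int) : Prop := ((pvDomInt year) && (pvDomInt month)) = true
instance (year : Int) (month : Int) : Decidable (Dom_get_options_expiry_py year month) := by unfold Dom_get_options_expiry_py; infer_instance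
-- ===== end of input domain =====

-- B replaces A's enumerate-all-month-days-and-filter-Thursdays loop by pure arithmetic:
-- Sakamoto's congruence for the weekday of the 1st, then 8 + (3 - wd) % 7 (objective: simpler).

-- ===== PORT A =====
-- calendar.isleap(year)
def pyIsLeap (y : Int) : Bool :=
  PySem.Int.mod y 4 == 0 && (PySem.Int.mod y 100 != 0 || PySem.Int.mod y 400 == 0)

-- datetime.date(y, month, day).weekday() via the proleptic-Gregorian ordinal
-- (exact on 1 ≤ month ≤ 12, 1 ≤ day ≤ 28; both Pythons only use day = 1)
def pyDateWeekday (y month day : Int) : Int :=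
  let yl := y - 1
  let daysBeforeYear :=
    365 * yl + PySem.Int.floordiv yl 4 - PySem.Int.floordiv yl 100 + PySem.Int.floordiv yl 400
  let daysBeforeMonth :=
    (PySem.List.pyGet? ([0, 31, 59, 90, 120, 151, 181, 212, 243, 273, 304, 334] : List Int) (month - 1)).getD 0
      + (if 2 < month ∧ pyIsLeap y then 1 else 0)
  PySem.Int.mod (daysBeforeYear + daysBeforeMonth + day - 1) 7

-- calendar.weekday(year, month, day): out-of-range years are first mapped to 2000 + year % 400
def pyCalWeekday (year month day : Int) : Int :=
  pyDateWeekday (if 1 ≤ year ∧ year ≤ 9999 then year else 2000 + PySem.Int.mod year 400) month day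

-- number of days of the month, as calendar.monthrange computes it
def pyNDays (year month : Int) : Int :=
  (PySem.List.pyGet? ([0, 31, 28, 31, 30, 31, 30, 31, 31, 30, 31, 30, 31] : List Int) month).getD 0
    + (if month = 2 ∧ pyIsLeap year then 1 else 0)

-- A's body given day1 = weekday of the 1st and ndays = length of the month:
-- the (day, weekday) pairs cal.itermonthdays2 yields (leading/trailing padding has day 0),
-- filtered to Thursdays of the month, indexed at 1
def aSecondThursday (day1 ndays : Int) : Int :=
  let days : List (Int × Int) :=
    (List.range day1.toNat).map (fun i => ((0 : Int), (i : Int)))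
      ++ (List.range ndays.toNat).map (fun i => ((i : Int) + 1, PySem.Int.mod (day1 + i) 7))
      ++ (List.range ((7 - PySem.Int.mod (day1 + ndays) 7).toNat % 7)).map
          (fun i => ((0 : Int), PySem.Int.mod (day1 + ndays + i) 7))
  let thursdays := days.filter (fun d => d.1 != 0 && d.2 == 3)
  match PySem.List.pyGet? thursdays 1 with
  | some t => t.1
  | none => 0

def get_options_expiry_py (year : Int) (month : Int) : Int :=
  aSecondThursday (pyCalWeekday year month 1) (pyNDays year month)

-- ===== PORT B =====
-- _weekday: Sakamoto's congruence, Monday = 0 (t[month-1] via getD, total on 1 ≤ month ≤ 12)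
def sakWeekday (year month : Int) : Int :=
  let t : List Int := [0, 3, 2, 5, 0, 3, 5, 1, 4, 6, 2, 4]
  let y := if month < 3 then year - 1 else year
  PySem.Int.mod
    (y + PySem.Int.floordiv y 4 - PySem.Int.floordiv y 100 + PySem.Int.floordiv y 400
      + (PySem.List.pyGet? t (month - 1)).getD 0) 7

def get_options_expiry_py_alt (year : Int) (month : Int) : Int :=
  8 + PySem.Int.mod (3 - sakWeekday year month) 7

-- ===== PRECONDITION & SPEC =====
-- Python A raises calendar.IllegalMonthError for months outside 1..12; years are total
-- (calendar.weekday folds out-of-range years into 2000 + year % 400).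
def Pre_get_options_expiry_py (year : Int) (month : Int) : Prop := 1 ≤ month ∧ month ≤ 12
instance (year : Int) (month : Int) : Decidable (Pre_get_options_expiry_py year month) := by
  unfold Pre_get_options_expiry_py; infer_instance

def pvWitness_get_options_expiry_py : Int × Int := (2024, 5)

def Spec_get_options_expiry_py (year : Int) (month : Int) (out : Int) : Prop :=
  out = get_options_expiry_py_alt year month
instance (year : Int) (month : Int) (out : Int) : Decidable (Spec_get_options_expiry_py year month out) := by
  unfold Spec_get_options_expiry_py; infer_instance

-- ===== CLAIM (what is proved, stated in full; the proofs are below) =====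
def Claim_equal_get_options_expiry_py : Prop := ∀ (year : Int) (month : Int), Dom_get_options_expiry_py year month → Pre_get_options_expiry_py year month → Spec_get_options_expiry_py year month (get_options_expiry_py year month)

-- ===== LEMMAS AND PROOFS =====

lemma pyMod_eq_emod (a b : Int) (hb : 0 < b) : PySem.Int.mod a b = a % b :=
  PySem.Int.mod_eq_emod_of_pos hb

lemma pvDshift (k v c : Int) (hc : 0 < c) : (c*k+v)/c = k + v/c := by
  rw [Int.add_ediv_of_dvd_left ⟨k, rfl⟩, Int.mul_ediv_cancel_left _ (by omega)]

lemma pvD4 (k v : Int) : (400*k+v)/4 = 100*k + v/4 := by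
  have h := pvDshift (100*k) v 4 (by norm_num); rw [← h]; ring_nf

lemma pvD100 (k v : Int) : (400*k+v)/100 = 4*k + v/100 := by
  have h := pvDshift (4*k) v 100 (by norm_num); rw [← h]; ring_nf

lemma pvD400 (k v : Int) : (400*k+v)/400 = k + v/400 := pvDshift k v 400 (by norm_num)

lemma sak_sum_shift (k v C : Int) :
    (400*k+v + (400*k+v)/4 - (400*k+v)/100 + (400*k+v)/400 + C) % 7
      = (v + v/4 - v/100 + v/400 + C) % 7 := by
  rw [pvD4, pvD100, pvD400]; omega

lemma leap_eq (y : Int) : pyIsLeap y = pyIsLeap (2000 + y % 400) := by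
  unfold pyIsLeap
  rw [PySem.Int.mod_eq_emod_of_pos (by norm_num : (0:Int) < 4),
      PySem.Int.mod_eq_emod_of_pos (by norm_num : (0:Int) < 100),
      PySem.Int.mod_eq_emod_of_pos (by norm_num : (0:Int) < 400),
      PySem.Int.mod_eq_emod_of_pos (by norm_num : (0:Int) < 4),
      PySem.Int.mod_eq_emod_of_pos (by norm_num : (0:Int) < 100),
      PySem.Int.mod_eq_emod_of_pos (by norm_num : (0:Int) < 400),
      show (2000 + y % 400) % 4 = y % 4 by omega,
      show (2000 + y % 400) % 100 = y % 100 by omega,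
      show (2000 + y % 400) % 400 = y % 400 by omega]

-- Gregorian 400-year periodicity for A's weekday core
lemma pyDateWeekday_shift (y m : Int) :
    pyDateWeekday y m 1 = pyDateWeekday (2000 + y % 400) m 1 := by
  unfold pyDateWeekday
  rw [leap_eq y]
  simp only [PySem.Int.mod_eq_emod_of_pos (by norm_num : (0:Int) < 7),
    PySem.Int.floordiv_eq_ediv_of_pos (by norm_num : (0:Int) < 4),
    PySem.Int.floordiv_eq_ediv_of_pos (by norm_num : (0:Int) < 100),
    PySem.Int.floordiv_eq_ediv_of_pos (by norm_num : (0:Int) < 400)]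
  generalize (PySem.List.pyGet? ([0, 31, 59, 90, 120, 151, 181, 212, 243, 273, 304, 334] : List Int) (m - 1)).getD 0 = C
  generalize (if 2 < m ∧ pyIsLeap (2000 + y % 400) then (1:Int) else 0) = L
  rw [show (2000 : Int) + y % 400 - 1 = 1999 + y % 400 by omega,
      show y - 1 = 400*(y/400-5) + (1999 + y % 400) by omega,
      pvD4, pvD100, pvD400]
  omega

-- the same periodicity for B's Sakamoto weekday
lemma sakWeekday_shift (y m : Int) :
    sakWeekday y m = sakWeekday (2000 + y % 400) m := by
  unfold sakWeekday
  simp only [PySem.Int.mod_eq_emod_of_pos (by norm_num : (0:Int) < 7),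
    PySem.Int.floordiv_eq_ediv_of_pos (by norm_num : (0:Int) < 4),
    PySem.Int.floordiv_eq_ediv_of_pos (by norm_num : (0:Int) < 100),
    PySem.Int.floordiv_eq_ediv_of_pos (by norm_num : (0:Int) < 400)]
  generalize (PySem.List.pyGet? ([0, 3, 2, 5, 0, 3, 5, 1, 4, 6, 2, 4] : List Int) (m - 1)).getD 0 = C
  by_cases hm : m < 3
  · rw [if_pos hm, if_pos hm]
    rw [show (2000 : Int) + y % 400 - 1 = 1999 + y % 400 by omega,
        show y - 1 = 400*(y/400-5) + (1999 + y % 400) by omega,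
        pvD4, pvD100, pvD400]
    omega
  · rw [if_neg hm, if_neg hm]
    have h := sak_sum_shift (y/400-5) (2000 + y % 400) C
    rw [show (400*(y/400-5) + (2000 + y % 400)) = y by omega] at h
    exact h

-- finite check: the two weekday computations agree on one full 400-year cycle
set_option maxRecDepth 100000 in
lemma wd_agree_cycle : ∀ r ∈ List.range 400, ∀ m ∈ List.range 12,
    pyDateWeekday (2000 + (r : Int)) ((m : Int) + 1) 1 = sakWeekday (2000 + (r : Int)) ((m : Int) + 1) := by
  decide

lemma wd_agree (year m : Int) (h1 : 1 ≤ m) (h2 : m ≤ 12) :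
    pyCalWeekday year m 1 = sakWeekday year m := by
  have hr0 : 0 ≤ year % 400 := Int.emod_nonneg _ (by norm_num)
  have hr1 : year % 400 < 400 := Int.emod_lt_of_pos _ (by norm_num)
  have hA : pyCalWeekday year m 1 = pyDateWeekday (2000 + year % 400) m 1 := by
    unfold pyCalWeekday
    rw [PySem.Int.mod_eq_emod_of_pos (by norm_num : (0:Int) < 400)]
    by_cases h : 1 ≤ year ∧ year ≤ 9999
    · rw [if_pos h]; exact pyDateWeekday_shift year m
    · rw [if_neg h]
  have hmid : pyDateWeekday (2000 + year % 400) m 1 = sakWeekday (2000 + year % 400) m := by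
    have hrep : (2000 : Int) + year % 400 = 2000 + (((year % 400).toNat : Nat) : Int) := by omega
    have hm : m = ((m - 1).toNat : Int) + 1 := by omega
    rw [hrep, hm]
    exact wd_agree_cycle (year % 400).toNat (List.mem_range.mpr (by omega)) (m - 1).toNat
      (List.mem_range.mpr (by omega))
  rw [hA, hmid, ← sakWeekday_shift year m]

lemma pyCalWeekday_bounds (year month day : Int) :
    0 ≤ pyCalWeekday year month day ∧ pyCalWeekday year month day < 7 := by
  unfold pyCalWeekday pyDateWeekday
  exact ⟨PySem.Int.mod_nonneg _ (by norm_num), PySem.Int.mod_lt _ (by norm_num)⟩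

lemma pyNDays_bounds (year month : Int) (h1 : 1 ≤ month) (h2 : month ≤ 12) :
    28 ≤ pyNDays year month ∧ pyNDays year month ≤ 31 := by
  unfold pyNDays
  interval_cases month <;> simp [PySem.List.pyGet?, PySem.List.pyIdx?] <;> split_ifs <;> omega

lemma aSecondThursday_closed (f n : Int) (hf0 : 0 ≤ f) (hf7 : f < 7)
    (hn28 : 28 ≤ n) (hn31 : n ≤ 31) :
    aSecondThursday f n = 8 + PySem.Int.mod (3 - f) 7 := by
  unfold aSecondThursday
  simp only [pyMod_eq_emod _ _ (by norm_num : (0:Int) < 7)]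
  interval_cases f <;> interval_cases n <;> decide

-- ===== VERDICT (by name: the statement is the Claim_ definition above) =====
theorem get_options_expiry_py_spec : Claim_equal_get_options_expiry_py := by
  intro year month _ hpre
  have hf := pyCalWeekday_bounds year month 1
  have hn := pyNDays_bounds year month hpre.1 hpre.2
  unfold Spec_get_options_expiry_py get_options_expiry_py get_options_expiry_py_alt
  rw [aSecondThursday_closed _ _ hf.1 hf.2 hn.1 hn.2, wd_agree year month hpre.1 hpre.2]
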